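-- pv_equiv track=rewrite | github.com/Woseseltops/fowlt | confusible_trainer/confusible_trainer.py | add_three_words_left
-- ===== SOURCE A (Python) =====
-- def add_three_words_left(lines,nl):
--     wordpointer = 1;
--     linepointer = 1;
--     previous_line = [];
--
--     while len(previous_line) < 3:
--
--         words_to_investigate = lines[nl - linepointer].replace('\n','').split(' ');
--
--         if len(words_to_investigate) == wordpointer-1:
--             linepointer+= 1;
--             words_to_investigate = lines[nl - linepointer].replace('\n','').split(' ');
--             wordpointer = 1;
--
--         previous_line.insert(0,words_to_investigate[-wordpointer]);
--         wordpointer += 1;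
--
--     return previous_line;
-- ===== SOURCE B (Python) =====
-- def add_three_words_left(lines, nl):
--     result = []
--     linepointer = 1
--     while len(result) < 3:
--         result = lines[nl - linepointer].replace('\n', '').split(' ') + result
--         linepointer += 1
--     return result[-3:]
-- ===== Notes on version B (the rewrite author's own statement) =====
-- stated objective: simpler
-- what changed: B replaces A's per-word walk (wordpointer/linepointer with an exhaustion guard and front-insertion of one word at a time) by prepending each whole line's word list and slicing the last three with result[-3:].
import Mathlib
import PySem

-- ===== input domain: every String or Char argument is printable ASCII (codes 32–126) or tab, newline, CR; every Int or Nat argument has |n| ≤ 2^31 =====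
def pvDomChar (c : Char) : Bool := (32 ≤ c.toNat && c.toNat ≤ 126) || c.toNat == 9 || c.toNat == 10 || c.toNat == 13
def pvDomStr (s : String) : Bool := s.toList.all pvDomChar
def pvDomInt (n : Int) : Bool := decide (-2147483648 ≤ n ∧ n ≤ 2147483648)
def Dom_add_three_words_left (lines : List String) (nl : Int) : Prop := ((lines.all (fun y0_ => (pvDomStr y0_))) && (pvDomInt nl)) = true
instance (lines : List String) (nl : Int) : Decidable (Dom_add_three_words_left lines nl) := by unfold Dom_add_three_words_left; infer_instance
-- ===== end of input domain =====

-- B prepends whole lines' word lists and slices the last three, instead of A's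
-- per-word wordpointer/linepointer walk; objective: simpler.

-- shared helper: `line.replace('\n','').split(' ')` (split(' ') never raises: sep ≠ "")
def pvWords (s : String) : List String :=
  (PySem.Str.split? (PySem.Str.replace s "\n" "") " ").getD []

-- ===== PORT A =====
def pvALoop (lines : List String) (nl : Int) : Nat → Int → Int → List String → List String
  | 0, _, _, prev => prev
  | fuel + 1, wp, lp, prev =>
    if prev.length < 3 then
      match PySem.List.pyGet? lines (nl - lp) with
      | none => prev                      -- Python raises IndexError here (excluded by Pre_)
      | some line =>
        let w := pvWords line
        if (w.length : Int) = wp - 1 then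
          match PySem.List.pyGet? lines (nl - (lp + 1)) with
          | none => prev                  -- IndexError (excluded by Pre_)
          | some line2 =>
            let w2 := pvWords line2
            match PySem.List.pyGet? w2 (-1) with
            | none => prev                -- unreachable: split(' ') is never empty
            | some x => pvALoop lines nl fuel 2 (lp + 1) (x :: prev)
        else
          match PySem.List.pyGet? w (-wp) with
          | none => prev                  -- unreachable inside the loop invariant
          | some x => pvALoop lines nl fuel (wp + 1) lp (x :: prev)
    else prev

-- the loop inserts one word per iteration and stops at 3, so fuel 3 is exact
def add_three_words_left (lines : List String) (nl : Int) : List String :=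
  pvALoop lines nl 3 1 1 []

-- ===== PORT B =====
def pvBLoop (lines : List String) (nl : Int) : Nat → Int → List String → List String
  | 0, _, result => result
  | fuel + 1, lp, result =>
    if result.length < 3 then
      match PySem.List.pyGet? lines (nl - lp) with
      | none => result                    -- Python raises IndexError here (excluded by Pre_)
      | some line => pvBLoop lines nl fuel (lp + 1) (pvWords line ++ result)
    else result

-- each iteration prepends at least one word, so fuel 3 is exact; `result[-3:]` is the slice
def add_three_words_left_alt (lines : List String) (nl : Int) : List String :=
  PySem.List.slice (pvBLoop lines nl 3 1 []) (some (-3)) none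

-- ===== PRECONDITION & SPEC =====
-- word count of the line at index i (0 if the index is invalid; Pre_ demands validity first)
def pvWc (lines : List String) (i : Int) : Nat :=
  match PySem.List.pyGet? lines i with
  | none => 0
  | some s => (pvWords s).length

-- Pre_ excludes exactly the inputs on which A raises IndexError: the backward line
-- indices nl-1, nl-2, nl-3 must be in (Python) range for as long as fewer than
-- three words have been collected.
def Pre_add_three_words_left (lines : List String) (nl : Int) : Prop :=
  PySem.Raise.InRange lines.length (nl - 1) ∧
    (3 ≤ pvWc lines (nl - 1) ∨
      (PySem.Raise.InRange lines.length (nl - 2) ∧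
        (3 ≤ pvWc lines (nl - 1) + pvWc lines (nl - 2) ∨
          PySem.Raise.InRange lines.length (nl - 3))))
instance (lines : List String) (nl : Int) : Decidable (Pre_add_three_words_left lines nl) := by
  unfold Pre_add_three_words_left; infer_instance

def pvWitness_add_three_words_left : List String × Int := (["a b c"], 1)

def Spec_add_three_words_left (lines : List String) (nl : Int) (out : List String) : Prop := out = add_three_words_left_alt lines nl
instance (lines : List String) (nl : Int) (out : List String) : Decidable (Spec_add_three_words_left lines nl out) := by unfold Spec_add_three_words_left; infer_instance

-- ===== CLAIM (what is proved, stated in full; the proofs are below) =====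
def Claim_equal_add_three_words_left : Prop := ∀ (lines : List String) (nl : Int), Dom_add_three_words_left lines nl → Pre_add_three_words_left lines nl → Spec_add_three_words_left lines nl (add_three_words_left lines nl)

-- ===== LEMMAS AND PROOFS =====

-- split never returns an empty list of pieces
lemma pvChars_splitOn_go_len (sep : List Char) :
    ∀ (fuel : Nat) (l cur : List Char) (acc : List (List Char)),
      acc.length + 1 ≤ (PySem.Chars.splitOn.go sep fuel l cur acc).length := by
  intro fuel
  induction fuel with
  | zero => intro l cur acc; simp [PySem.Chars.splitOn.go]
  | succ n ih =>
    intro l cur acc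
    cases l with
    | nil => simp [PySem.Chars.splitOn.go]
    | cons c rest =>
      simp only [PySem.Chars.splitOn.go]
      split
      · have h := ih (List.drop sep.length (c :: rest)) [] (cur.reverse :: acc)
        simp only [List.length_cons] at h
        omega
      · exact ih _ _ _

lemma pvWords_len (s : String) : 1 ≤ (pvWords s).length := by
  simp only [pvWords, PySem.Str.split?, PySem.Chars.split?, PySem.Chars.splitOn]
  simpa using pvChars_splitOn_go_len [' '] _ _ [] []

-- one loop iteration of A that takes a word from the current line
lemma pvALoop_take (lines : List String) (nl : Int) (fuel : Nat) (wp lp : Int) (prev : List String)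
    (line x : String) (h : prev.length < 3)
    (hl : PySem.List.pyGet? lines (nl - lp) = some line)
    (hne : ¬ ((pvWords line).length : Int) = wp - 1)
    (hx : PySem.List.pyGet? (pvWords line) (-wp) = some x) :
    pvALoop lines nl (fuel + 1) wp lp prev = pvALoop lines nl fuel (wp + 1) lp (x :: prev) := by
  simp only [pvALoop, if_pos h, hl, if_neg hne, hx]

-- one loop iteration of A that advances to the previous line
lemma pvALoop_next (lines : List String) (nl : Int) (fuel : Nat) (wp lp : Int) (prev : List String)
    (line line2 x : String) (h : prev.length < 3)
    (hl : PySem.List.pyGet? lines (nl - lp) = some line)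
    (heq : ((pvWords line).length : Int) = wp - 1)
    (hl2 : PySem.List.pyGet? lines (nl - (lp + 1)) = some line2)
    (hx : PySem.List.pyGet? (pvWords line2) (-1) = some x) :
    pvALoop lines nl (fuel + 1) wp lp prev = pvALoop lines nl fuel 2 (lp + 1) (x :: prev) := by
  simp only [pvALoop, if_pos h, hl, if_pos heq, hl2, hx]

-- one loop iteration of B
lemma pvBLoop_step (lines : List String) (nl : Int) (fuel : Nat) (lp : Int) (result : List String)
    (line : String) (h : result.length < 3)
    (hl : PySem.List.pyGet? lines (nl - lp) = some line) :
    pvBLoop lines nl (fuel + 1) lp result = pvBLoop lines nl fuel (lp + 1) (pvWords line ++ result) := by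
  simp only [pvBLoop, if_pos h, hl]

lemma pvBLoop_done (lines : List String) (nl : Int) (fuel : Nat) (lp : Int) (result : List String)
    (h : ¬ result.length < 3) :
    pvBLoop lines nl fuel lp result = result := by
  cases fuel <;> simp only [pvBLoop, if_neg h]

-- negative indexing into an explicit tail
lemma pvGetLast2 {α : Type} (p : List α) (a b : α) :
    PySem.List.pyGet? (p ++ [a, b]) (-2) = some a := by
  rw [PySem.List.pyGet?_neg_ofNat _ 2 (by omega) (by simp)]
  simp

lemma pvGetLast3 {α : Type} (p : List α) (a b c : α) :
    PySem.List.pyGet? (p ++ [a, b, c]) (-3) = some a := by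
  rw [PySem.List.pyGet?_neg_ofNat _ 3 (by omega) (by simp)]
  simp

lemma pvDropLastPart {α : Type} (p s : List α) :
    (p ++ s).drop ((p ++ s).length - s.length) = s := by
  simp [List.length_append]

-- a list of length ≥ k splits off its last k elements
lemma pvSplit1 {α : Type} (w : List α) (h : 1 ≤ w.length) : ∃ p a, w = p ++ [a] := by
  obtain ⟨a, ha⟩ := List.length_eq_one_iff.mp (show (w.drop (w.length - 1)).length = 1 by simp; omega)
  exact ⟨w.take (w.length - 1), a, by rw [← ha]; exact (List.take_append_drop _ w).symm⟩

lemma pvSplit2 {α : Type} (w : List α) (h : 2 ≤ w.length) : ∃ p a b, w = p ++ [a, b] := by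
  obtain ⟨a, b, hab⟩ := List.length_eq_two.mp (show (w.drop (w.length - 2)).length = 2 by simp; omega)
  exact ⟨w.take (w.length - 2), a, b, by rw [← hab]; exact (List.take_append_drop _ w).symm⟩

lemma pvSplit3 {α : Type} (w : List α) (h : 3 ≤ w.length) : ∃ p a b c, w = p ++ [a, b, c] := by
  obtain ⟨a, b, c, habc⟩ := List.length_eq_three.mp (show (w.drop (w.length - 3)).length = 3 by simp; omega)
  exact ⟨w.take (w.length - 3), a, b, c, by rw [← habc]; exact (List.take_append_drop _ w).symm⟩

lemma pvGetSome (xs : List String) (i : Int) (h : PySem.Raise.InRange xs.length i) :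
    ∃ v, PySem.List.pyGet? xs i = some v := by
  cases hx : PySem.List.pyGet? xs i with
  | none => exact absurd h ((PySem.List.pyGet?_eq_none_iff _ _).mp hx)
  | some v => exact ⟨v, rfl⟩

-- CASE 1: the last line already holds at least three words
lemma pvCase3 (lines : List String) (nl : Int) (l1 : String) (l : List String) (a b c : String)
    (hl1 : PySem.List.pyGet? lines (nl - 1) = some l1)
    (hw : pvWords l1 = l ++ [a, b, c]) :
    pvALoop lines nl 3 1 1 [] =
      PySem.List.slice (pvBLoop lines nl 3 1 []) (some (-3)) none := by
  have hg1 : PySem.List.pyGet? (pvWords l1) (-1) = some c := by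
    rw [hw, show l ++ [a, b, c] = (l ++ [a, b]) ++ [c] by simp]
    exact PySem.List.pyGet?_neg_one_append_singleton _ _
  have hg2 : PySem.List.pyGet? (pvWords l1) (-2) = some b := by
    rw [hw, show l ++ [a, b, c] = (l ++ [a]) ++ [b, c] by simp]
    exact pvGetLast2 _ _ _
  have hg3 : PySem.List.pyGet? (pvWords l1) (-3) = some a := by rw [hw]; exact pvGetLast3 _ _ _ _
  have hlen : (pvWords l1).length = l.length + 3 := by rw [hw]; simp
  rw [pvALoop_take lines nl 2 1 1 [] l1 c (by simp) hl1 (by rw [hlen]; omega) hg1]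
  norm_num
  rw [pvALoop_take lines nl 1 2 1 [c] l1 b (by simp) hl1 (by rw [hlen]; omega) hg2]
  norm_num
  rw [pvALoop_take lines nl 0 3 1 [b, c] l1 a (by simp) hl1 (by rw [hlen]; omega) hg3]
  rw [pvBLoop_step lines nl 2 1 [] l1 (by simp) hl1]
  rw [pvBLoop_done lines nl _ _ _ (by rw [List.append_nil, hlen]; omega)]
  rw [PySem.List.slice_from_neg_ofNat _ 3 (by omega)]
  rw [List.append_nil, hw]
  show _ = (l ++ [a, b, c]).drop ((l ++ [a, b, c]).length - ([a, b, c] : List String).length)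
  rw [pvDropLastPart]
  rfl

-- CASE 2: the last line has exactly two words, one more comes from the line before
lemma pvCase2 (lines : List String) (nl : Int) (l1 l2 : String) (x y : String)
    (p : List String) (b : String)
    (hl1 : PySem.List.pyGet? lines (nl - 1) = some l1)
    (hl2 : PySem.List.pyGet? lines (nl - 2) = some l2)
    (hw1 : pvWords l1 = [x, y])
    (hw2 : pvWords l2 = p ++ [b]) :
    pvALoop lines nl 3 1 1 [] =
      PySem.List.slice (pvBLoop lines nl 3 1 []) (some (-3)) none := by
  have hg1 : PySem.List.pyGet? (pvWords l1) (-1) = some y := by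
    rw [hw1, show ([x, y] : List String) = [x] ++ [y] by simp]
    exact PySem.List.pyGet?_neg_one_append_singleton _ _
  have hg2 : PySem.List.pyGet? (pvWords l1) (-2) = some x := by
    rw [hw1, show ([x, y] : List String) = [] ++ [x, y] by simp]
    exact pvGetLast2 _ _ _
  have hb : PySem.List.pyGet? (pvWords l2) (-1) = some b := by
    rw [hw2]; exact PySem.List.pyGet?_neg_one_append_singleton _ _
  have hlen1 : (pvWords l1).length = 2 := by rw [hw1]; rfl
  have hl2' : PySem.List.pyGet? lines (nl - (1 + 1)) = some l2 := by norm_num; exact hl2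
  rw [pvALoop_take lines nl 2 1 1 [] l1 y (by simp) hl1 (by rw [hlen1]; omega) hg1]
  norm_num
  rw [pvALoop_take lines nl 1 2 1 [y] l1 x (by simp) hl1 (by rw [hlen1]; omega) hg2]
  norm_num
  rw [pvALoop_next lines nl 0 3 1 [x, y] l1 l2 b (by simp) hl1 (by rw [hlen1]; norm_num) hl2' hb]
  rw [pvBLoop_step lines nl 2 1 [] l1 (by simp) hl1]
  rw [pvBLoop_step lines nl 1 (1 + 1) _ l2 (by rw [List.append_nil, hlen1]; omega) hl2']
  rw [pvBLoop_done lines nl _ _ _ (by simp [hw1, hw2])]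
  rw [PySem.List.slice_from_neg_ofNat _ 3 (by omega)]
  rw [List.append_nil, hw1, hw2, show p ++ [b] ++ [x, y] = p ++ [b, x, y] by simp]
  show _ = (p ++ [b, x, y]).drop ((p ++ [b, x, y]).length - ([b, x, y] : List String).length)
  rw [pvDropLastPart]
  rfl

-- CASE 3: one word on the last line, at least two on the line before
lemma pvCase1b (lines : List String) (nl : Int) (l1 l2 : String) (x : String)
    (p : List String) (a b : String)
    (hl1 : PySem.List.pyGet? lines (nl - 1) = some l1)
    (hl2 : PySem.List.pyGet? lines (nl - 2) = some l2)
    (hw1 : pvWords l1 = [x])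
    (hw2 : pvWords l2 = p ++ [a, b]) :
    pvALoop lines nl 3 1 1 [] =
      PySem.List.slice (pvBLoop lines nl 3 1 []) (some (-3)) none := by
  have hg1 : PySem.List.pyGet? (pvWords l1) (-1) = some x := by
    rw [hw1, show ([x] : List String) = [] ++ [x] by simp]
    exact PySem.List.pyGet?_neg_one_append_singleton _ _
  have hb : PySem.List.pyGet? (pvWords l2) (-1) = some b := by
    rw [hw2, show p ++ [a, b] = (p ++ [a]) ++ [b] by simp]
    exact PySem.List.pyGet?_neg_one_append_singleton _ _
  have ha : PySem.List.pyGet? (pvWords l2) (-2) = some a := by rw [hw2]; exact pvGetLast2 _ _ _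
  have hlen1 : (pvWords l1).length = 1 := by rw [hw1]; rfl
  have hlen2 : (pvWords l2).length = p.length + 2 := by rw [hw2]; simp
  have hl2' : PySem.List.pyGet? lines (nl - (1 + 1)) = some l2 := by norm_num; exact hl2
  rw [pvALoop_take lines nl 2 1 1 [] l1 x (by simp) hl1 (by rw [hlen1]; omega) hg1]
  norm_num
  rw [pvALoop_next lines nl 1 2 1 [x] l1 l2 b (by simp) hl1 (by rw [hlen1]; norm_num) hl2' hb]
  norm_num
  rw [pvALoop_take lines nl 0 2 2 [b, x] l2 a (by simp) hl2 (by rw [hlen2]; omega) ha]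
  rw [pvBLoop_step lines nl 2 1 [] l1 (by simp) hl1]
  rw [pvBLoop_step lines nl 1 (1 + 1) _ l2 (by rw [List.append_nil, hlen1]; omega) hl2']
  rw [pvBLoop_done lines nl _ _ _ (by simp [hw1, hw2])]
  rw [PySem.List.slice_from_neg_ofNat _ 3 (by omega)]
  rw [List.append_nil, hw1, hw2, show p ++ [a, b] ++ [x] = p ++ [a, b, x] by simp]
  show _ = (p ++ [a, b, x]).drop ((p ++ [a, b, x]).length - ([a, b, x] : List String).length)
  rw [pvDropLastPart]
  rfl

-- CASE 4: one word each on the last two lines, the third word from a third line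
lemma pvCase1a (lines : List String) (nl : Int) (l1 l2 l3 : String) (x y : String)
    (p : List String) (c : String)
    (hl1 : PySem.List.pyGet? lines (nl - 1) = some l1)
    (hl2 : PySem.List.pyGet? lines (nl - 2) = some l2)
    (hl3 : PySem.List.pyGet? lines (nl - 3) = some l3)
    (hw1 : pvWords l1 = [x])
    (hw2 : pvWords l2 = [y])
    (hw3 : pvWords l3 = p ++ [c]) :
    pvALoop lines nl 3 1 1 [] =
      PySem.List.slice (pvBLoop lines nl 3 1 []) (some (-3)) none := by
  have hg1 : PySem.List.pyGet? (pvWords l1) (-1) = some x := by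
    rw [hw1, show ([x] : List String) = [] ++ [x] by simp]
    exact PySem.List.pyGet?_neg_one_append_singleton _ _
  have hy : PySem.List.pyGet? (pvWords l2) (-1) = some y := by
    rw [hw2, show ([y] : List String) = [] ++ [y] by simp]
    exact PySem.List.pyGet?_neg_one_append_singleton _ _
  have hc : PySem.List.pyGet? (pvWords l3) (-1) = some c := by
    rw [hw3]; exact PySem.List.pyGet?_neg_one_append_singleton _ _
  have hlen1 : (pvWords l1).length = 1 := by rw [hw1]; rfl
  have hlen2 : (pvWords l2).length = 1 := by rw [hw2]; rfl
  have hl2' : PySem.List.pyGet? lines (nl - (1 + 1)) = some l2 := by norm_num; exact hl2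
  have hl3' : PySem.List.pyGet? lines (nl - (2 + 1)) = some l3 := by norm_num; exact hl3
  rw [pvALoop_take lines nl 2 1 1 [] l1 x (by simp) hl1 (by rw [hlen1]; omega) hg1]
  norm_num
  rw [pvALoop_next lines nl 1 2 1 [x] l1 l2 y (by simp) hl1 (by rw [hlen1]; norm_num) hl2' hy]
  norm_num
  rw [pvALoop_next lines nl 0 2 2 [y, x] l2 l3 c (by simp) hl2 (by rw [hlen2]; norm_num) hl3' hc]
  rw [pvBLoop_step lines nl 2 1 [] l1 (by simp) hl1]
  rw [pvBLoop_step lines nl 1 (1 + 1) _ l2 (by rw [List.append_nil, hlen1]; omega) hl2']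
  norm_num
  rw [pvBLoop_step lines nl 0 3 _ l3 (by simp [hw1, hw2]) hl3]
  simp only [pvBLoop]
  rw [PySem.List.slice_from_neg_ofNat _ 3 (by omega)]
  rw [hw1, hw2, hw3, show p ++ [c] ++ ([y] ++ [x]) = p ++ [c, y, x] by simp]
  show _ = (p ++ [c, y, x]).drop ((p ++ [c, y, x]).length - ([c, y, x] : List String).length)
  rw [pvDropLastPart]
  rfl

-- ===== VERDICT (by name: the statement is the Claim_ definition above) =====
theorem add_three_words_left_spec : Claim_equal_add_three_words_left := by
  intro lines nl _ hPre
  obtain ⟨hIn1, hrest⟩ := hPre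
  obtain ⟨l1, hl1⟩ := pvGetSome lines (nl - 1) hIn1
  have hwc1 : pvWc lines (nl - 1) = (pvWords l1).length := by simp [pvWc, hl1]
  unfold Spec_add_three_words_left add_three_words_left add_three_words_left_alt
  by_cases h3 : 3 ≤ (pvWords l1).length
  · obtain ⟨l, a, b, c, hw⟩ := pvSplit3 _ h3
    exact pvCase3 lines nl l1 l a b c hl1 hw
  · have hrest2 : _ := hrest.resolve_left (by omega)
    obtain ⟨hIn2, hrest3⟩ := hrest2
    obtain ⟨l2, hl2⟩ := pvGetSome lines (nl - 2) hIn2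
    have hwc2 : pvWc lines (nl - 2) = (pvWords l2).length := by simp [pvWc, hl2]
    have hn1 := pvWords_len l1
    by_cases h2 : (pvWords l1).length = 2
    · obtain ⟨x, y, hw1⟩ := List.length_eq_two.mp h2
      obtain ⟨p, b, hw2⟩ := pvSplit1 _ (pvWords_len l2)
      exact pvCase2 lines nl l1 l2 x y p b hl1 hl2 hw1 hw2
    · have h1 : (pvWords l1).length = 1 := by omega
      obtain ⟨x, hw1⟩ := List.length_eq_one_iff.mp h1
      by_cases h2b : 2 ≤ (pvWords l2).length
      · obtain ⟨p, a, b, hw2⟩ := pvSplit2 _ h2b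
        exact pvCase1b lines nl l1 l2 x p a b hl1 hl2 hw1 hw2
      · have h21 : (pvWords l2).length = 1 := by have := pvWords_len l2; omega
        obtain ⟨y, hw2⟩ := List.length_eq_one_iff.mp h21
        have hIn3 : PySem.Raise.InRange lines.length (nl - 3) :=
          hrest3.resolve_left (by omega)
        obtain ⟨l3, hl3⟩ := pvGetSome lines (nl - 3) hIn3
        obtain ⟨p, c, hw3⟩ := pvSplit1 _ (pvWords_len l3)
        exact pvCase1a lines nl l1 l2 l3 x y p c hl1 hl2 hl3 hw1 hw2 hw3
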